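-- pv_equiv track=rewrite | github.com/AdrianoW/Twitter-sentiment-analysis-master | 0-Scripts/libs/utils.py | get_sent_idx
-- ===== SOURCE A (Python) =====
-- def get_sent_idx(labels):
--     """
--     Returns the index to positive, neutral and negative tweets
--
--     Params:
--         train_data: list of tweets
--         labels: the labels associated with the tweets (1,0, -1)
--
--     ret:
--         ([positive], [neutral], [negative]) indexes
--
--     """
--     pos = []
--     neg = []
--     neu = []
--
--     # get the indexes
--     pos = [ i for i, l in enumerate(labels) if l ==1]
--     neg = [ i for i, l in enumerate(labels) if l ==-1]
--     neu = [ i for i, l in enumerate(labels) if l ==0]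
--     return pos, neu, neg
-- ===== SOURCE B (Python) =====
-- def get_sent_idx(labels):
--     pos, neu, neg = [], [], []
--     for i, l in enumerate(labels):
--         if l == 1:
--             pos.append(i)
--         elif l == -1:
--             neg.append(i)
--         elif l == 0:
--             neu.append(i)
--     return pos, neu, neg
-- ===== Notes on version B (the rewrite author's own statement) =====
-- stated objective: faster
-- what changed: Replaced A's three independent full scans of enumerate(labels) with a single pass that dispatches each index into pos/neg/neu, dropping labels outside {1,0,-1} just as A does.
import Mathlib
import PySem

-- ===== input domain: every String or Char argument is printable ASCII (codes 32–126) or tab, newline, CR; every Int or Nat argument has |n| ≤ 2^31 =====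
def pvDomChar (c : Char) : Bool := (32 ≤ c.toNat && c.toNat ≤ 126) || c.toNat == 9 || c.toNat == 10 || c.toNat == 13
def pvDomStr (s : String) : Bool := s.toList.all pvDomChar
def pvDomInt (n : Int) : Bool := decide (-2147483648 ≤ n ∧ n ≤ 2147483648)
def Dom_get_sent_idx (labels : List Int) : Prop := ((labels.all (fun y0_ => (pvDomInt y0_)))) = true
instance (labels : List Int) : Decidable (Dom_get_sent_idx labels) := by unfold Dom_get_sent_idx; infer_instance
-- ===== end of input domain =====

-- B replaces A's three full scans of enumerate(labels) with one dispatching pass (objective: faster by a constant factor).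

-- ===== PORT A =====
-- three independent comprehensions over enumerate(labels)
def get_sent_idx (labels : List Int) : List Int × List Int × List Int :=
  let pos := ((PySem.List.enumerate labels).filter (fun p => p.2 == 1)).map (fun p => p.1)
  let neg := ((PySem.List.enumerate labels).filter (fun p => p.2 == -1)).map (fun p => p.1)
  let neu := ((PySem.List.enumerate labels).filter (fun p => p.2 == 0)).map (fun p => p.1)
  (pos, neu, neg)

-- ===== PORT B =====
-- single loop over enumerate(labels), appending the index to the matching bucket
def get_sent_idx_alt (labels : List Int) : List Int × List Int × List Int :=
  -- acc = (pos, neu, neg); each index is appended to the matching bucket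
  let step : (List Int × List Int × List Int) → (Int × Int) → (List Int × List Int × List Int) :=
    fun acc p =>
      if p.2 == 1 then (acc.1 ++ [p.1], acc.2.1, acc.2.2)
      else if p.2 == -1 then (acc.1, acc.2.1, acc.2.2 ++ [p.1])
      else if p.2 == 0 then (acc.1, acc.2.1 ++ [p.1], acc.2.2)
      else acc
  (PySem.List.enumerate labels).foldl step ([], [], [])

-- ===== PRECONDITION & SPEC =====
def Spec_get_sent_idx (labels : List Int) (out : List Int × List Int × List Int) : Prop := out = get_sent_idx_alt labels
instance (labels : List Int) (out : List Int × List Int × List Int) : Decidable (Spec_get_sent_idx labels out) := by unfold Spec_get_sent_idx; infer_instance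

-- ===== CLAIM (what is proved, stated in full; the proofs are below) =====
def Claim_equal_get_sent_idx : Prop := ∀ (labels : List Int), Dom_get_sent_idx labels → Spec_get_sent_idx labels (get_sent_idx labels)

-- ===== LEMMAS AND PROOFS =====

-- the single-pass fold equals the three filtered projections, for any pair list and accumulators
theorem pv_fold_eq (xs : List (Int × Int)) (pos neu neg : List Int) :
    xs.foldl (fun acc p =>
      let (pos, neu, neg) := acc
      if p.2 == 1 then (pos ++ [p.1], neu, neg)
      else if p.2 == -1 then (pos, neu, neg ++ [p.1])
      else if p.2 == 0 then (pos, neu ++ [p.1], neg)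
      else (pos, neu, neg)) (pos, neu, neg)
    = (pos ++ (xs.filter (fun p => p.2 == 1)).map (fun p => p.1),
       neu ++ (xs.filter (fun p => p.2 == 0)).map (fun p => p.1),
       neg ++ (xs.filter (fun p => p.2 == -1)).map (fun p => p.1)) := by
  induction xs generalizing pos neu neg with
  | nil => simp
  | cons x xs ih =>
    by_cases h1 : x.2 = 1
    · have b1 : (x.2 == 1) = true := by simp [h1]
      have b2 : (x.2 == -1) = false := by simp [h1]
      have b3 : (x.2 == 0) = false := by simp [h1]
      simp only [List.foldl_cons, List.filter_cons, b1, b2, b3, if_true, if_false]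
      rw [ih]; simp
    · by_cases h2 : x.2 = -1
      · have b1 : (x.2 == 1) = false := by simp [h1]
        have b2 : (x.2 == -1) = true := by simp [h2]
        have b3 : (x.2 == 0) = false := by simp [h2]
        simp only [List.foldl_cons, List.filter_cons, b1, b2, b3, if_true, if_false]
        rw [ih]; simp
      · by_cases h3 : x.2 = 0
        · have b1 : (x.2 == 1) = false := by simp [h1]
          have b2 : (x.2 == -1) = false := by simp [h2]
          have b3 : (x.2 == 0) = true := by simp [h3]
          simp only [List.foldl_cons, List.filter_cons, b1, b2, b3, if_true, if_false]
          rw [ih]; simp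
        · have b1 : (x.2 == 1) = false := by simp [h1]
          have b2 : (x.2 == -1) = false := by simp [h2]
          have b3 : (x.2 == 0) = false := by simp [h3]
          simp only [List.foldl_cons, List.filter_cons, b1, b2, b3, if_true, if_false]
          exact ih pos neu neg

-- ===== VERDICT (by name: the statement is the Claim_ definition above) =====
theorem get_sent_idx_spec : Claim_equal_get_sent_idx := by
  intro labels _
  simp only [Spec_get_sent_idx, get_sent_idx, get_sent_idx_alt]
  rw [pv_fold_eq]
  simp
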